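-- pv_equiv track=rewrite | github.com/DeepLink-org/DIOPI | diopi_test/python/conformance/diopi_set_nhwc.py | compute_nhwc_stride_3d
-- ===== SOURCE A (Python) =====
-- def compute_nhwc_stride_3d(sizes, itemsize=1):
--     dim = len(sizes)
--     strides = [itemsize for i in range(dim)]
--     assert dim == 4 or dim == 5, "not supported dim"
--     if dim == 4:
--         strides[0] = itemsize
--         strides[3] = strides[0] * sizes[0]
--         strides[2] = strides[3] * sizes[3]
--         strides[1] = strides[2] * sizes[2]
--     elif dim == 5:
--         strides[1] = itemsize
--         strides[4] = strides[0] * sizes[1]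
--         strides[3] = strides[4] * sizes[4]
--         strides[2] = strides[3] * sizes[3]
--         strides[0] = strides[2] * sizes[2]
--     return strides
-- ===== SOURCE B (Python) =====
-- def compute_nhwc_stride_3d(sizes, itemsize=1):
--     assert len(sizes) == 4 or len(sizes) == 5, "not supported dim"
--     # Closed form: the stride of dimension i equals itemsize times the product of the
--     # sizes of the dimensions filled before i in NHWC order; each output is computed
--     # independently from a per-rank predecessor table (no mutation, no running state).
--     preds = {4: [[], [0, 3, 2], [0, 3], [0]],
--              5: [[1, 4, 3, 2], [], [1, 4, 3], [1, 4], [1]]}[len(sizes)]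
--     def prod_over(ix):
--         r = itemsize
--         for j in ix:
--             r *= sizes[j]
--         return r
--     return [prod_over(ix) for ix in preds]
-- ===== Notes on version B (the rewrite author's own statement) =====
-- stated objective: alternative
-- what changed: Replaces A's sequential in-place accumulation chain over a stride array with a per-output closed form: each dimension's stride is computed independently as itemsize times the product of the sizes listed in a per-rank predecessor table, assembled by a comprehension with no mutation or running accumulator.
import Mathlib
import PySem

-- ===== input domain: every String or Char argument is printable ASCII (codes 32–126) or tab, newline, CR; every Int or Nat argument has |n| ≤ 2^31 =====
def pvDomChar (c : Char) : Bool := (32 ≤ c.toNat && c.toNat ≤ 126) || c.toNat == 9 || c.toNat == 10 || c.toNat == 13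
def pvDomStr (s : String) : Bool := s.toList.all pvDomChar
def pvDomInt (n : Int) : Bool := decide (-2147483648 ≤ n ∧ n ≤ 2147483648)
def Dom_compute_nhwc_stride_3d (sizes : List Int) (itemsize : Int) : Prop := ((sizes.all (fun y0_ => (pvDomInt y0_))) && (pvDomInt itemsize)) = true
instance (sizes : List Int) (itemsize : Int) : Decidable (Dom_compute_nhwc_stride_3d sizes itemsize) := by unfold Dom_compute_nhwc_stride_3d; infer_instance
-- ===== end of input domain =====

-- B computes each stride independently as a closed-form product over a per-rank predecessor
-- table instead of A's sequential in-place accumulation; both raise AssertionError outside Pre_.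

-- ===== PORT A =====
-- All indexing is at literal indices < dim with dim = 4 resp. 5, so List.getD is exact.
def compute_nhwc_stride_3d (sizes : List Int) (itemsize : Int) : List Int :=
  let dim := sizes.length
  let strides := List.replicate dim itemsize
  if dim = 4 then
    let strides := strides.set 0 itemsize
    let strides := strides.set 3 (strides.getD 0 0 * sizes.getD 0 0)
    let strides := strides.set 2 (strides.getD 3 0 * sizes.getD 3 0)
    let strides := strides.set 1 (strides.getD 2 0 * sizes.getD 2 0)
    strides
  else if dim = 5 then
    let strides := strides.set 1 itemsize
    let strides := strides.set 4 (strides.getD 0 0 * sizes.getD 1 0)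
    let strides := strides.set 3 (strides.getD 4 0 * sizes.getD 4 0)
    let strides := strides.set 2 (strides.getD 3 0 * sizes.getD 3 0)
    let strides := strides.set 0 (strides.getD 2 0 * sizes.getD 2 0)
    strides
  else strides  -- unreachable: the assert raises here (excluded by Pre_)

-- ===== PORT B =====
-- prod_over: itemsize times the product of the sizes at the given indices (all < dim, so getD is exact)
def pvProdOver (sizes : List Int) (itemsize : Int) (ix : List Nat) : Int :=
  ix.foldl (fun r j => r * sizes.getD j 0) itemsize

def compute_nhwc_stride_3d_alt (sizes : List Int) (itemsize : Int) : List Int :=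
  if sizes.length = 4 ∨ sizes.length = 5 then
    let preds : List (List Nat) :=
      if sizes.length = 4 then [[], [0, 3, 2], [0, 3], [0]]
      else [[1, 4, 3, 2], [], [1, 4, 3], [1, 4], [1]]
    preds.map (pvProdOver sizes itemsize)
  else []  -- unreachable: the assert raises here (excluded by Pre_)

-- ===== PRECONDITION & SPEC =====
-- Pre_ excludes exactly the inputs where A's assert raises AssertionError (dim not 4 or 5).
def Pre_compute_nhwc_stride_3d (sizes : List Int) (itemsize : Int) : Prop :=
  sizes.length = 4 ∨ sizes.length = 5
instance (sizes : List Int) (itemsize : Int) : Decidable (Pre_compute_nhwc_stride_3d sizes itemsize) := by unfold Pre_compute_nhwc_stride_3d; infer_instance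
def pvWitness_compute_nhwc_stride_3d : List Int × Int := ([2, 3, 4, 5], 1)

def Spec_compute_nhwc_stride_3d (sizes : List Int) (itemsize : Int) (out : List Int) : Prop := out = compute_nhwc_stride_3d_alt sizes itemsize
instance (sizes : List Int) (itemsize : Int) (out : List Int) : Decidable (Spec_compute_nhwc_stride_3d sizes itemsize out) := by unfold Spec_compute_nhwc_stride_3d; infer_instance

-- ===== CLAIM =====
def Claim_equal_compute_nhwc_stride_3d : Prop := ∀ (sizes : List Int) (itemsize : Int), Dom_compute_nhwc_stride_3d sizes itemsize → Pre_compute_nhwc_stride_3d sizes itemsize → Spec_compute_nhwc_stride_3d sizes itemsize (compute_nhwc_stride_3d sizes itemsize)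

-- ===== LEMMAS AND PROOFS =====

-- ===== VERDICT =====
theorem compute_nhwc_stride_3d_spec : Claim_equal_compute_nhwc_stride_3d := by
  intro sizes itemsize _ hpre
  unfold Spec_compute_nhwc_stride_3d
  rcases sizes with _ | ⟨a, _ | ⟨b, _ | ⟨c, _ | ⟨d, _ | ⟨e, _ | ⟨f, rest⟩⟩⟩⟩⟩⟩ <;>
    simp [Pre_compute_nhwc_stride_3d] at hpre <;>
    simp [compute_nhwc_stride_3d, compute_nhwc_stride_3d_alt, pvProdOver, List.foldl]
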